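-- pv_equiv track=rewrite | github.com/40uf411/Qamus | Qamus/Core/Indexer.py | mergedIndexes
-- ===== SOURCE A (Python) =====
-- from collections import Counter
--
-- def mergedIndexes(indexes):
--     # getting a list of all the terms
--     c = Counter()
--     for index in indexes.keys():
--         c.update(list(indexes[index].keys()))
--     # creating a dict that contains all the terms and their frequency in the docs
--     data = dict()
--     for term in c.keys():
--         data[term] = dict()
--         # for index in indexes.keys():
--         #     data[term][index] = 0
--     # updating the frequency
--     for index, freqs in indexes.items():
--         for term, freq in freqs.items():
--             data[term][index] = freq
--     return data
-- ===== SOURCE B (Python) =====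
-- def mergedIndexes(indexes):
--     # inverted traversal: collect the distinct terms once (first-appearance order),
--     # then build each term's doc->freq row by scanning the indexes for that term
--     terms = dict.fromkeys(t for freqs in indexes.values() for t in freqs)
--     return {t: {idx: freqs[t] for idx, freqs in indexes.items() if t in freqs}
--             for t in terms}
-- ===== Notes on version B (the rewrite author's own statement) =====
-- stated objective: alternative
-- what changed: Inverted the traversal: instead of A's Counter pass, empty-inner-dict pass and doc-by-doc fill loop, B collects the distinct terms once and then builds each term's doc->freq row by a per-term scan over the indexes (a dict comprehension per term).
import Mathlib
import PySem

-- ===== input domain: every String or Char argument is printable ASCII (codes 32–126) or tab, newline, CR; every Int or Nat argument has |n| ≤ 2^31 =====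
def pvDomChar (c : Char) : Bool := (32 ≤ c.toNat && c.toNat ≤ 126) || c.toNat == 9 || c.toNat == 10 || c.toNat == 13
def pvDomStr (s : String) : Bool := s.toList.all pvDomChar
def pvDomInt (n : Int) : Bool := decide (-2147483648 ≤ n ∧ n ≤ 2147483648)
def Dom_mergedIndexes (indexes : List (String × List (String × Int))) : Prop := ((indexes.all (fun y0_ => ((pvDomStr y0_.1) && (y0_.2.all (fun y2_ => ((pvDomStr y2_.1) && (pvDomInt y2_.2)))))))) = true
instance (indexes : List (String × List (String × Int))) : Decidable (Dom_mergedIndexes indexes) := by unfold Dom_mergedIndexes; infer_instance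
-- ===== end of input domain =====

-- B inverts the traversal: instead of A's doc-by-doc fill (after a Counter pass and an
-- empty-dict pre-creation pass), B collects the distinct terms once and then builds each
-- term's doc→freq row by a per-term scan of the indexes; same value, different decomposition.

-- ===== PORT A =====
def mergedIndexes (indexes : List (String × List (String × Int))) : List (String × List (String × Int)) :=
  -- the dict arguments arrive as association lists; rebuild the dicts first
  let d : PySem.Dict String (PySem.Dict String Int) :=
    PySem.Dict.ofList (indexes.map (fun p => (p.1, PySem.Dict.ofList p.2)))
  -- c = Counter(); for index in indexes.keys(): c.update(list(indexes[index].keys()))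
  let c : PySem.Dict String Int :=
    d.keys.foldl (fun c index =>
      ((d.getD index PySem.Dict.empty).keys).foldl (fun c t => c.modify t 0 (· + 1)) c)
      PySem.Dict.empty
  -- data = dict(); for term in c.keys(): data[term] = dict()
  let data0 : PySem.Dict String (PySem.Dict String Int) :=
    c.keys.foldl (fun data term => data.insert term PySem.Dict.empty) PySem.Dict.empty
  -- for index, freqs in indexes.items(): for term, freq in freqs.items(): data[term][index] = freq
  -- (term is always a key of data here, so the total 'modify' with default {} is exact)
  let data := d.items.foldl (fun data p =>
      p.2.items.foldl (fun data q =>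
        data.modify q.1 PySem.Dict.empty (fun inner => inner.insert p.1 q.2)) data)
    data0
  data.items.map (fun p => (p.1, p.2.items))

-- ===== PORT B =====
def mergedIndexes_alt (indexes : List (String × List (String × Int))) : List (String × List (String × Int)) :=
  let d : PySem.Dict String (PySem.Dict String Int) :=
    PySem.Dict.ofList (indexes.map (fun p => (p.1, PySem.Dict.ofList p.2)))
  -- terms = dict.fromkeys(t for freqs in indexes.values() for t in freqs)
  -- (first occurrences in order = PySem.Set.ofList of the flattened key sequence)
  let terms : List String := PySem.Set.ofList (d.items.flatMap (fun p => p.2.keys))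
  -- {t: {idx: freqs[t] for idx, freqs in indexes.items() if t in freqs} for t in terms}
  -- (the inner comprehension's keys idx are the distinct doc names, so the dict it
  --  builds is exactly this filterMap list of (idx, freq) pairs)
  terms.map (fun t =>
    (t, d.items.filterMap (fun p => (p.2.get? t).map (fun v => (p.1, v)))))

-- ===== PRECONDITION & SPEC =====
def Spec_mergedIndexes (indexes : List (String × List (String × Int))) (out : List (String × List (String × Int))) : Prop := out = mergedIndexes_alt indexes
instance (indexes : List (String × List (String × Int))) (out : List (String × List (String × Int))) : Decidable (Spec_mergedIndexes indexes out) := by unfold Spec_mergedIndexes; infer_instance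

-- ===== CLAIM (what is proved, stated in full; the proofs are below) =====
def Claim_equal_mergedIndexes : Prop := ∀ (indexes : List (String × List (String × Int))), Dom_mergedIndexes indexes → Spec_mergedIndexes indexes (mergedIndexes indexes)

-- ===== LEMMAS AND PROOFS =====

-- a nested fold is a fold over the flattened list
theorem foldl_foldl_flatMap {α β γ : Type} (l : List α) (g : α → List β) (f : γ → β → γ)
    (init : γ) :
    l.foldl (fun acc a => (g a).foldl f acc) init = (l.flatMap g).foldl f init := by
  induction l generalizing init with
  | nil => rfl
  | cons a l ih => simp [List.foldl_append, ih]

-- Set.update adds nothing when every element is already present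
theorem set_update_of_subset {s : PySem.Set String} {l : List String}
    (h : ∀ x ∈ l, x ∈ s) : PySem.Set.update s l = s := by
  induction l generalizing s with
  | nil => rfl
  | cons a l ih =>
      rw [PySem.Set.update_cons, PySem.Set.add_of_mem (h a (by simp))]
      exact ih fun x hx => h x (by simp [hx])

-- a fold of inserts of the empty dict leaves every getD-with-empty-default at empty
theorem getD_foldl_insert_empty (K : List String) (d : PySem.Dict String (PySem.Dict String Int))
    (h : ∀ t, d.getD t PySem.Dict.empty = PySem.Dict.empty) (t : String) :
    (K.foldl (fun data term => data.insert term PySem.Dict.empty) d).getD t PySem.Dict.empty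
      = PySem.Dict.empty := by
  induction K generalizing d with
  | nil => exact h t
  | cons k K ih =>
      refine ih _ (fun t' => ?_)
      rw [PySem.Dict.getD_insert]
      split <;> simp [h]

-- a keyed modify-fold, read back at one key, is a fold over the matching entries
theorem getD_foldl_modify_filter {β : Type} (L : List β) (key : β → String)
    (f : β → PySem.Dict String Int → PySem.Dict String Int)
    (d : PySem.Dict String (PySem.Dict String Int)) (t : String) :
    (L.foldl (fun data x => data.modify (key x) PySem.Dict.empty (f x)) d).getD t PySem.Dict.empty
      = (L.filter (fun x => key x == t)).foldl (fun v x => f x v) (d.getD t PySem.Dict.empty) := by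
  induction L generalizing d with
  | nil => rfl
  | cons a L ih =>
      rw [List.foldl_cons, ih, List.filter_cons]
      by_cases hk : key a = t
      · simp [hk, PySem.Dict.getD_modify_self]
      · have : (key a == t) = false := by simp [hk]
        have hne : t ≠ key a := fun h => hk h.symm
        simp only [this, Bool.false_eq_true, if_false]
        rw [PySem.Dict.getD_modify_of_ne _ PySem.Dict.empty (f a) hne]

-- filterMap as a flatMap of option-toList
theorem filterMap_eq_flatMap_toList {α β : Type} (l : List α) (f : α → Option β) :
    l.filterMap f = l.flatMap (fun a => (f a).toList) := by
  induction l with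
  | nil => rfl
  | cons a l ih => cases h : f a <;> simp [h, ih]

-- filter distributes over flatMap
theorem filter_flatMap {α β : Type} (l : List α) (g : α → List β) (p : β → Bool) :
    (l.flatMap g).filter p = l.flatMap (fun a => (g a).filter p) := by
  induction l with
  | nil => rfl
  | cons a l ih => simp [List.filter_append, ih]

-- with pairwise-distinct keys, filtering an association list at one key that is present
-- yields exactly that one entry
theorem filter_key_singleton {ν : Type} (l : List (String × ν))
    (h : (l.map Prod.fst).Nodup) (t : String) (v : ν) (hm : (t, v) ∈ l) :
    l.filter (fun q => q.1 == t) = [(t, v)] := by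
  induction l with
  | nil => cases hm
  | cons a l ih =>
      simp only [List.map_cons, List.nodup_cons] at h
      rcases List.mem_cons.mp hm with h1 | h1
      · subst h1
        rw [List.filter_cons]
        simp only [beq_self_eq_true, if_true]
        have : l.filter (fun q => q.1 == t) = [] := by
          refine List.filter_eq_nil_iff.mpr (fun q hq => ?_)
          simp only [beq_iff_eq]
          exact fun he => h.1 (by rw [← he]; exact List.mem_map.mpr ⟨q, hq, rfl⟩)
        rw [this]
      · have hne : a.1 ≠ t := fun he => h.1 (by rw [he]; exact List.mem_map.mpr ⟨(t, v), h1, rfl⟩)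
        rw [List.filter_cons]
        simp only [beq_iff_eq, hne, if_false]
        exact ih h.2 h1

-- the same filter through a Dict lookup: matching items = the optional entry
theorem items_filter_key {ν : Type} (d : PySem.Dict String ν) (h : d.keys.Nodup)
    (t : String) :
    d.items.filter (fun q => q.1 == t) = ((d.get? t).map (fun v => (t, v))).toList := by
  cases hv : d.get? t with
  | none =>
      refine List.filter_eq_nil_iff.mpr (fun q hq => ?_)
      simp only [beq_iff_eq]
      intro he
      have : t ∈ d.keys := he ▸ PySem.Dict.mem_keys_of_mem_items d hq
      exact ((PySem.Dict.get?_eq_none_iff_not_mem_keys d t).mp hv) this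
  | some v =>
      have hm : (t, v) ∈ d.items := PySem.Dict.mem_items_of_get?_eq_some d hv
      have h' : (d.items.map Prod.fst).Nodup := by
        simpa [PySem.Dict.keys] using h
      simpa using filter_key_singleton d.items h' t v hm

-- the doc names picked up by the per-term scan form a sublist of the doc-key list
theorem inner_keys_sublist (l : List (String × PySem.Dict String Int)) (t : String) :
    ((l.filterMap (fun p => (p.2.get? t).map (fun v => (p.1, v)))).map Prod.fst).Sublist
      (l.map Prod.fst) := by
  induction l with
  | nil => exact List.Sublist.refl _
  | cons a l ih =>
      rw [List.filterMap_cons]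
      cases a.2.get? t with
      | none => exact (ih.cons _)
      | some v => simpa using (ih.cons₂ a.1)

-- every value of a dict built by a fold of inserts satisfies what the inserted values satisfy
theorem values_prop_foldl_insert {κ ν : Type} [BEq κ] [LawfulBEq κ] (P : ν → Prop)
    (l : List (κ × ν)) (d : PySem.Dict κ ν)
    (hd : ∀ v ∈ d.values, P v) (hl : ∀ p ∈ l, P p.2) :
    ∀ v ∈ (l.foldl (fun d p => d.insert p.1 p.2) d).values, P v := by
  induction l generalizing d with
  | nil => exact hd
  | cons a l ih =>
      refine ih _ (fun v hv => ?_) (fun p hp => hl p (by simp [hp]))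
      rcases PySem.Dict.mem_values_insert d a.1 a.2 v hv with h1 | h1
      · exact h1 ▸ hl a (by simp)
      · exact hd v h1

theorem mergedIndexes_eq (indexes : List (String × List (String × Int))) :
    mergedIndexes indexes = mergedIndexes_alt indexes := by
  simp only [mergedIndexes, mergedIndexes_alt]
  set d : PySem.Dict String (PySem.Dict String Int) :=
    PySem.Dict.ofList (indexes.map (fun p => (p.1, PySem.Dict.ofList p.2))) with hd
  have hnd : d.keys.Nodup := PySem.Dict.nodup_keys_ofList _
  have hvals : ∀ p ∈ d.items, p.2.keys.Nodup := by
    rw [hd]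
    intro p hp
    have hv : p.2 ∈ (PySem.Dict.ofList
        (indexes.map (fun p => (p.1, PySem.Dict.ofList p.2)))).values := by
      simp only [PySem.Dict.values]
      exact List.mem_map.mpr ⟨p, hp, rfl⟩
    have hv2 : p.2 ∈ ((indexes.map (fun p => (p.1, PySem.Dict.ofList p.2))).foldl
        (fun d p => d.insert p.1 p.2) PySem.Dict.empty).values := hv
    refine values_prop_foldl_insert (fun v => v.keys.Nodup)
      (indexes.map (fun p => (p.1, PySem.Dict.ofList p.2))) PySem.Dict.empty
      (by intro v hv'; simp [PySem.Dict.values, PySem.Dict.empty] at hv')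
      (by intro q hq
          simp only [List.mem_map] at hq
          obtain ⟨r, _, hr⟩ := hq
          exact hr ▸ PySem.Dict.nodup_keys_ofList _)
      p.2 hv2
  -- flatten both nested fill loops into a single fold over one flattened list L
  have hflat : ∀ (D : PySem.Dict String (PySem.Dict String Int)),
      d.items.foldl (fun data p => p.2.items.foldl (fun data q =>
        data.modify q.1 PySem.Dict.empty (fun inner => inner.insert p.1 q.2)) data) D
      = (d.items.flatMap (fun p => p.2.items.map (fun q => (q.1, p.1, q.2)))).foldl
          (fun data x => data.modify x.1 PySem.Dict.empty
            (fun inner => inner.insert x.2.1 x.2.2)) D := by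
    intro D
    rw [← foldl_foldl_flatMap]
    congr 1; funext data p
    rw [List.foldl_map]
  set L : List (String × String × Int) :=
    d.items.flatMap (fun p => p.2.items.map (fun q => (q.1, p.1, q.2))) with hL
  set K : List String := PySem.Set.ofList (L.map (fun x => x.1)) with hKdef
  have hKnd : K.Nodup := PySem.Set.nodup_ofList _
  -- the counter pass visits exactly the term sequence L.map (·.1)
  have hT : d.keys.flatMap (fun index => (d.getD index PySem.Dict.empty).keys)
      = L.map (fun x => x.1) := by
    rw [hL, List.map_flatMap]
    show (d.items.map (fun p => p.1)).flatMap _ = _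
    rw [List.flatMap_map]
    refine List.flatMap_congr (fun p hp => ?_)
    rw [PySem.Dict.getD_of_mem_items d (by simpa using hp) hnd]
    simp only [PySem.Dict.keys, List.map_map]
    rfl
  -- the counter's key list (first-appearance order of the terms)
  have hcflat := foldl_foldl_flatMap d.keys
      (fun index => (d.getD index PySem.Dict.empty).keys)
      (fun (c : PySem.Dict String Int) t => c.modify t 0 (· + 1)) PySem.Dict.empty
  have hcK : (d.keys.foldl (fun (c : PySem.Dict String Int) index =>
        ((d.getD index PySem.Dict.empty).keys).foldl
          (fun c t => c.modify t 0 (· + 1)) c) PySem.Dict.empty).keys = K := by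
    rw [hcflat, hT, PySem.Dict.keys_foldl_modify _ _ (fun _ _ v => v + 1),
      PySem.Dict.keys_empty, PySem.Set.update_nil_left]
  rw [hcK]
  -- B's term list is the same K
  have hterms : (PySem.Set.ofList (d.items.flatMap (fun p => p.2.keys)) : List String) = K := by
    rw [hKdef]
    congr 1
    rw [hL, List.map_flatMap]
    refine List.flatMap_congr (fun p _ => ?_)
    simp only [PySem.Dict.keys, List.map_map]
    rfl
  rw [hterms]
  -- the pre-created dict of empty inner dicts
  set D0 : PySem.Dict String (PySem.Dict String Int) :=
    K.foldl (fun data term => data.insert term PySem.Dict.empty) PySem.Dict.empty with hD0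
  have hD0keys : D0.keys = K := by
    rw [hD0, PySem.Dict.keys_foldl_insert _ (fun _ _ => PySem.Dict.empty),
      PySem.Dict.keys_empty, PySem.Set.update_nil_left, hKdef,
      PySem.Set.ofList_eq_self_of_nodup _ hKnd]
  have hD0getD : ∀ t, D0.getD t PySem.Dict.empty = PySem.Dict.empty :=
    getD_foldl_insert_empty K PySem.Dict.empty (fun t => PySem.Dict.getD_empty t _)
  rw [hflat D0]
  -- A's fill result: keys K, rows read back per term
  have hkeysA : (L.foldl (fun data x => data.modify x.1 PySem.Dict.empty
        (fun inner => inner.insert x.2.1 x.2.2)) D0).keys = K := by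
    rw [PySem.Dict.keys_foldl_modify_key L (fun x : String × String × Int => x.1)
        PySem.Dict.empty (fun _ x inner => inner.insert x.2.1 x.2.2) D0, hD0keys]
    exact set_update_of_subset (fun x hx => by
      rw [hKdef]; exact (PySem.Set.mem_ofList _ _).mpr hx)
  rw [PySem.Dict.items_eq_map_keys _ (hkeysA ▸ hKnd) PySem.Dict.empty, hkeysA, List.map_map]
  refine List.map_congr_left (fun t _ => ?_)
  simp only [Function.comp]
  refine Prod.ext rfl ?_
  -- the row A built for t, read back, is the per-term scan B performs
  show (((L.foldl (fun data x => data.modify x.1 PySem.Dict.empty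
        (fun inner => inner.insert x.2.1 x.2.2)) D0)).getD t PySem.Dict.empty).items = _
  rw [getD_foldl_modify_filter L (fun x => x.1) (fun x inner => inner.insert x.2.1 x.2.2) D0 t,
    hD0getD]
  have hLf : L.filter (fun x => x.1 == t)
      = (d.items.filterMap (fun p => (p.2.get? t).map (fun v => (p.1, v)))).map
          (fun r => (t, r.1, r.2)) := by
    rw [hL, filter_flatMap]
    rw [filterMap_eq_flatMap_toList, List.map_flatMap]
    refine List.flatMap_congr (fun p hp => ?_)
    rw [List.filter_map]
    have : (fun (x : String × String × Int) => x.1 == t) ∘ (fun q : String × Int => (q.1, p.1, q.2))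
        = fun q : String × Int => q.1 == t := rfl
    rw [this, items_filter_key p.2 (hvals p hp) t]
    cases p.2.get? t <;> rfl
  rw [hLf, List.foldl_map]
  have hfresh := PySem.Dict.items_foldl_insert_fresh
    (l := d.items.filterMap (fun p => (p.2.get? t).map (fun v => (p.1, v))))
    (k := Prod.fst) (v := Prod.snd) (d := (PySem.Dict.empty : PySem.Dict String Int))
    (by intro a _; simp [PySem.Dict.contains_empty])
    (by
      refine List.Nodup.sublist (inner_keys_sublist d.items t) ?_
      simpa [PySem.Dict.keys] using hnd)
  simpa using hfresh

-- ===== VERDICT (by name: the statement is the Claim_ definition above) =====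
theorem mergedIndexes_spec : Claim_equal_mergedIndexes := by
  intro indexes _
  exact mergedIndexes_eq indexes
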